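-- pv_equiv track=rewrite | github.com/zzong2006/coding-problems-study | pythonProject/programmers/diskController.py | least_job
-- ===== SOURCE A (Python) =====
-- def least_job(curr, jbs):
--     output = None
--     smallest = jbs[-1]
--     for i in range(0, len(jbs)):
--         start, consume = jbs[i]
--         if curr >= start and (
--             output is None
--             or output[1] > consume
--             or (output[1] == consume and output[0] > start)
--         ):
--             output = jbs[i]
--         if smallest[0] > start or (smallest[0] == start and smallest[1] > consume):
--             smallest = jbs[i]
--     if output is None:
--         return smallest
--     else:
--         return output
-- ===== SOURCE B (Python) =====
-- def least_job(curr, jbs):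
--     # Sort-then-scan: unpack the (start, consume) pairs, order them by
--     # (consume, start) with two chained stable sorts and return the first
--     # already-available one; if none is available, order by (start, consume)
--     # the same way and return the earliest job.
--     jobs = [[start, consume] for start, consume in jbs]
--     by_consume = sorted(sorted(jobs, key=lambda j: j[0]), key=lambda j: j[1])
--     for job in by_consume:
--         if curr >= job[0]:
--             return job
--     by_start = sorted(sorted(jobs, key=lambda j: j[1]), key=lambda j: j[0])
--     return by_start[0]
-- ===== Notes on version B (the rewrite author's own statement) =====
-- stated objective: alternative
-- what changed: A's single fused pass with two hand-maintained accumulators is replaced by a sort-then-scan strategy: stable-sort the jobs by (consume, start) via two chained key sorts and return the first available one, else take the head of the jobs stable-sorted by (start, consume).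
import Mathlib
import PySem

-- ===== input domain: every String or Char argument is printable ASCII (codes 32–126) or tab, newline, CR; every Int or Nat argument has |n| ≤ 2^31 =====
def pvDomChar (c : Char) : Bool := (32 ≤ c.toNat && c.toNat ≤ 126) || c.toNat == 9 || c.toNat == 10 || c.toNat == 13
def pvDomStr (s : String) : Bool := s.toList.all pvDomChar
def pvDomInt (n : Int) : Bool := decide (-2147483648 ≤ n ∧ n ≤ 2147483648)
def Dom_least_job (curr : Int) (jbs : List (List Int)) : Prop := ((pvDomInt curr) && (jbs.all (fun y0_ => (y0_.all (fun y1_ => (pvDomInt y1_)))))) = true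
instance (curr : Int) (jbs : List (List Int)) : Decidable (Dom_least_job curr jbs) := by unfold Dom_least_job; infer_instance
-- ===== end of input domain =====

-- B replaces A's single fused accumulator loop by sort-then-scan: stable-sort by
-- (consume, start) via two chained key sorts and take the first available job, else the
-- head of the (start, consume)-sorted list; alternative decomposition, same return value.

-- ===== PORT A =====
-- transliteration of A: smallest = jbs[-1]; one loop (the body is the helper AStep) updating
-- output (best available by (consume, start)) and smallest (global min by (start, consume));
-- jb[0]/jb[1] via pyGet? (.getD 0 is unreachable under Pre_, which forces length-2 jobs).
def AStep (curr : Int) (st : Option (List Int) × List Int) (jb : List Int) : Option (List Int) × List Int :=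
  let start := (PySem.List.pyGet? jb 0).getD 0
  let consume := (PySem.List.pyGet? jb 1).getD 0
  let output :=
    match st.1 with
    | none => if curr ≥ start then some jb else none
    | some o =>
      if curr ≥ start ∧ ((PySem.List.pyGet? o 1).getD 0 > consume ∨
          ((PySem.List.pyGet? o 1).getD 0 = consume ∧ (PySem.List.pyGet? o 0).getD 0 > start))
      then some jb else st.1
  let smallest :=
    if st.2.headD 0 > start ∨ (st.2.headD 0 = start ∧ (st.2.drop 1).headD 0 > consume)
    then jb else st.2
  (output, smallest)

def least_job (curr : Int) (jbs : List (List Int)) : List Int :=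
  match PySem.List.pyGet? jbs (-1) with
  | none => []  -- empty jbs: Python raises IndexError (outside Pre_)
  | some sm0 =>
    let st := jbs.foldl (AStep curr) (none, sm0)
    match st.1 with
    | none => st.2
    | some o => o

-- ===== PORT B =====
-- transliteration of Source B: jobs = the unpacked [start, consume] pairs (Python raises there on
-- a job of length ≠ 2, outside Pre_; the unpack is ported via pyGet?, exact on length-2 jobs);
-- by_consume = sorted(sorted(jobs, key=j[0]), key=j[1]) (two chained stable sorts); the
-- scan-and-return-first loop is List.find?; else by_start[0] via pyGet? (none = IndexError
-- on empty jbs, outside Pre_).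
def least_job_alt (curr : Int) (jbs : List (List Int)) : List Int :=
  let jobs := jbs.map (fun j => [(PySem.List.pyGet? j 0).getD 0, (PySem.List.pyGet? j 1).getD 0])
  let byConsume := PySem.List.sorted
      (PySem.List.sorted jobs (fun j => (PySem.List.pyGet? j 0).getD 0))
      (fun j => (PySem.List.pyGet? j 1).getD 0)
  match byConsume.find? (fun j => decide (curr ≥ (PySem.List.pyGet? j 0).getD 0)) with
  | some job => job
  | none =>
    let byStart := PySem.List.sorted
        (PySem.List.sorted jobs (fun j => (PySem.List.pyGet? j 1).getD 0))
        (fun j => (PySem.List.pyGet? j 0).getD 0)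
    match PySem.List.pyGet? byStart 0 with
    | some m => m
    | none => []  -- empty jbs: Python raises IndexError (outside Pre_)

-- ===== PRECONDITION & SPEC =====
-- Pre_: exactly the inputs where A returns: jbs nonempty (jbs[-1] else IndexError) and every
-- job of length 2 ('start, consume = jbs[i]' else ValueError).
def Pre_least_job (curr : Int) (jbs : List (List Int)) : Prop :=
  jbs ≠ [] ∧ ∀ j ∈ jbs, j.length = 2
instance (curr : Int) (jbs : List (List Int)) : Decidable (Pre_least_job curr jbs) := by
  unfold Pre_least_job; infer_instance
def pvWitness_least_job : Int × List (List Int) := (1, [[0, 3], [1, 2], [5, 1]])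

def Spec_least_job (curr : Int) (jbs : List (List Int)) (out : List Int) : Prop := out = least_job_alt curr jbs
instance (curr : Int) (jbs : List (List Int)) (out : List Int) : Decidable (Spec_least_job curr jbs out) := by unfold Spec_least_job; infer_instance

-- ===== CLAIM (what is proved, stated in full; the proofs are below) =====
def Claim_equal_least_job : Prop := ∀ (curr : Int) (jbs : List (List Int)), Dom_least_job curr jbs → Pre_least_job curr jbs → Spec_least_job curr jbs (least_job curr jbs)

-- ===== LEMMAS AND PROOFS =====

-- j[0] and j[1] (as the ports read them)
def jf0 (j : List Int) : Int := (PySem.List.pyGet? j 0).getD 0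
def jf1 (j : List Int) : Int := (PySem.List.pyGet? j 1).getD 0

-- lexicographic ≤ on the (f, g) projections
def lexBy (f g : List Int → Int) (a b : List Int) : Prop :=
  f a < f b ∨ (f a = f b ∧ g a ≤ g b)

lemma lex_refl (f g : List Int → Int) (a : List Int) : lexBy f g a a :=
  Or.inr ⟨rfl, le_refl _⟩

-- two length-2 jobs with equal fields are equal
lemma eq_of_fields (j k : List Int) (hj : j.length = 2) (hk : k.length = 2)
    (h0 : jf0 j = jf0 k) (h1 : jf1 j = jf1 k) : j = k := by
  match j, hj, k, hk with
  | [a, b], _, [c, d], _ =>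
    simp only [jf0, jf1] at h0 h1
    simp [PySem.List.pyGet?, PySem.List.pyIdx?] at h0 h1
    simp [h0, h1]

-- stability of insertBy: inserting x (latest in g-order) preserves Lex-pairwiseness
lemma insertBy_pairwise_lex (f g : List Int → Int) (x : List Int) :
    ∀ (ys : List (List Int)), ys.Pairwise (lexBy f g) → (∀ y ∈ ys, g y ≤ g x) →
    (PySem.List.insertBy (fun a b => decide (f a < f b)) x ys).Pairwise (lexBy f g) := by
  intro ys
  induction ys with
  | nil => intro _ _; simp [PySem.List.insertBy]
  | cons y t ih =>
    intro hp hall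
    rw [List.pairwise_cons] at hp
    show (if (decide (f x < f y)) = true then x :: y :: t
          else y :: PySem.List.insertBy (fun a b => decide (f a < f b)) x t).Pairwise (lexBy f g)
    split_ifs with h
    · simp only [decide_eq_true_eq] at h
      refine List.Pairwise.cons ?_ (List.Pairwise.cons hp.1 hp.2)
      intro z hz
      rcases List.mem_cons.mp hz with rfl | hz
      · exact Or.inl h
      · have := hp.1 z hz
        unfold lexBy at *; omega
    · simp only [decide_eq_true_eq] at h
      refine List.Pairwise.cons ?_ (ih hp.2 (fun z hz => hall z (List.mem_cons_of_mem _ hz)))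
      intro z hz
      rcases (PySem.List.mem_insertBy _ _ _ _).mp hz with rfl | hz
      · have := hall y List.mem_cons_self
        unfold lexBy; omega
      · exact hp.1 z hz

lemma foldl_insertBy_pairwise_lex (f g : List Int → Int) :
    ∀ (xs acc : List (List Int)), xs.Pairwise (fun a b => g a ≤ g b) →
    acc.Pairwise (lexBy f g) → (∀ a ∈ acc, ∀ x ∈ xs, g a ≤ g x) →
    (xs.foldl (fun acc x => PySem.List.insertBy (fun a b => decide (f a < f b)) x acc) acc).Pairwise (lexBy f g) := by
  intro xs
  induction xs with
  | nil => intro acc _ hacc _; exact hacc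
  | cons x t ih =>
    intro acc hx hacc hcross
    rw [List.pairwise_cons] at hx
    rw [List.foldl_cons]
    apply ih _ hx.2
    · exact insertBy_pairwise_lex f g x acc hacc
        (fun a ha => hcross a ha x List.mem_cons_self)
    · intro a ha z hz
      rcases (PySem.List.mem_insertBy _ _ _ _).mp ha with rfl | ha
      · exact hx.1 z hz
      · exact hcross a ha z (List.mem_cons_of_mem _ hz)

-- sorted(sorted(xs, key=g), key=f) is lexBy f g pairwise (the stable two-pass tuple sort)
lemma sorted_sorted_lex (f g : List Int → Int) (xs : List (List Int)) :
    (PySem.List.sorted (PySem.List.sorted xs g) f).Pairwise (lexBy f g) := by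
  rw [PySem.List.sorted_eq_foldl_insertBy]
  exact foldl_insertBy_pairwise_lex f g _ []
    (PySem.List.sorted_pairwise xs g) List.Pairwise.nil (by intro a ha; cases ha)

-- find? on a Pairwise list returns an R-minimal satisfying element
lemma find?_pairwise_min (R : List Int → List Int → Prop) (p : List Int → Bool) :
    ∀ (l : List (List Int)) (m : List Int), l.Pairwise R → l.find? p = some m →
    ∀ y ∈ l, p y = true → (y = m ∨ R m y) := by
  intro l
  induction l with
  | nil => intro m _ h; cases h
  | cons a t ih =>
    intro m hp hf y hy hpy
    rw [List.pairwise_cons] at hp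
    by_cases ha : p a = true
    · rw [List.find?_cons_of_pos ha] at hf
      cases hf
      rcases List.mem_cons.mp hy with rfl | hy
      · exact Or.inl rfl
      · exact Or.inr (hp.1 y hy)
    · rw [List.find?_cons_of_neg ha] at hf
      rcases List.mem_cons.mp hy with rfl | hy
      · exact absurd hpy ha
      · exact ih m hp.2 hf y hy hpy

-- the step of A's 'output' accumulator once it is some
def mstepCS (acc : Option (List Int)) (x : List Int) : Option (List Int) :=
  match acc with
  | none => some x
  | some m => if jf1 m > jf1 x ∨ (jf1 m = jf1 x ∧ jf0 m > jf0 x) then some x else some m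

-- the 'smallest' accumulator step of A
def sstep (sm x : List Int) : List Int :=
  if sm.headD 0 > jf0 x ∨ (sm.headD 0 = jf0 x ∧ (sm.drop 1).headD 0 > jf1 x) then x else sm

lemma AStep_fst (curr : Int) (st : Option (List Int) × List Int) (x : List Int) :
    (AStep curr st x).1 = if decide (curr ≥ jf0 x) = true then mstepCS st.1 x else st.1 := by
  rcases st with ⟨o, sm⟩
  cases o with
  | none => simp only [AStep, mstepCS, jf0, decide_eq_true_eq]
  | some m =>
    simp only [AStep, mstepCS, jf0, jf1, decide_eq_true_eq]
    split_ifs <;> first | rfl | omega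

lemma AStep_snd (curr : Int) (st : Option (List Int) × List Int) (x : List Int) :
    (AStep curr st x).2 = sstep st.2 x := rfl

lemma foldl_AStep (curr : Int) :
    ∀ (xs : List (List Int)) (st : Option (List Int) × List Int),
    xs.foldl (AStep curr) st =
      ((xs.filter (fun j => decide (curr ≥ jf0 j))).foldl mstepCS st.1, xs.foldl sstep st.2) := by
  intro xs
  induction xs with
  | nil => intro st; rfl
  | cons x t ih =>
    intro st
    simp only [List.foldl_cons, ih, List.filter_cons]
    rw [AStep_fst, AStep_snd]
    by_cases h : (decide (curr ≥ jf0 x) = true) <;> simp [h]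

-- A's 'output' fold computes a lexBy jf1 jf0 minimum of its input
lemma foldl_mstepCS_min : ∀ (t : List (List Int)) (m : List Int),
    ∃ m', t.foldl mstepCS (some m) = some m' ∧ m' ∈ m :: t ∧ ∀ y ∈ m :: t, lexBy jf1 jf0 m' y := by
  intro t
  induction t with
  | nil =>
    intro m
    refine ⟨m, rfl, List.mem_cons_self, ?_⟩
    intro y hy
    simp only [List.mem_cons, List.not_mem_nil, or_false] at hy
    subst hy
    exact lex_refl _ _ _
  | cons x t ih =>
    intro m
    simp only [List.foldl_cons, mstepCS]
    split_ifs with h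
    · obtain ⟨m', h1, h2, h3⟩ := ih x
      refine ⟨m', h1, ?_, ?_⟩
      · rcases List.mem_cons.mp h2 with h' | h' <;> simp [h']
      · intro y hy
        rcases List.mem_cons.mp hy with rfl | hy
        · have hx := h3 x List.mem_cons_self
          unfold lexBy at *; omega
        · exact h3 y hy
    · obtain ⟨m', h1, h2, h3⟩ := ih m
      refine ⟨m', h1, ?_, ?_⟩
      · rcases List.mem_cons.mp h2 with h' | h' <;> simp [h']
      · intro y hy
        rcases List.mem_cons.mp hy with rfl | hy
        · have hm := h3 _ List.mem_cons_self
          unfold lexBy at *; omega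
        · rcases List.mem_cons.mp hy with rfl | hy
          · have hm := h3 _ List.mem_cons_self
            unfold lexBy at *; omega
          · exact h3 y (List.mem_cons_of_mem _ hy)

-- A's 'smallest' fold computes a lexBy jf0 jf1 minimum of its input
lemma foldl_sstep_min : ∀ (xs : List (List Int)) (sm : List Int),
    xs.foldl sstep sm ∈ sm :: xs ∧ ∀ y ∈ sm :: xs, lexBy jf0 jf1 (xs.foldl sstep sm) y := by
  intro xs
  induction xs with
  | nil =>
    intro sm
    refine ⟨List.mem_cons_self, ?_⟩
    intro y hy
    simp only [List.mem_cons, List.not_mem_nil, or_false] at hy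
    subst hy
    exact lex_refl _ _ _
  | cons x t ih =>
    intro sm
    simp only [List.foldl_cons]
    have hs : sstep sm x = x ∨ sstep sm x = sm := by
      unfold sstep; split_ifs <;> simp
    have h0 : jf0 sm = sm.headD 0 := by
      unfold jf0
      cases sm <;> simp [PySem.List.pyGet?, PySem.List.pyIdx?]
    have h1 : jf1 sm = (sm.drop 1).headD 0 := by
      unfold jf1
      cases sm with
      | nil => simp [PySem.List.pyGet?, PySem.List.pyIdx?]
      | cons a s => cases s <;> simp [PySem.List.pyGet?, PySem.List.pyIdx?]
    have hle : lexBy jf0 jf1 (sstep sm x) sm ∧ lexBy jf0 jf1 (sstep sm x) x := by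
      unfold sstep
      rw [← h0, ← h1]
      split_ifs with h <;> unfold lexBy <;> constructor <;> omega
    obtain ⟨hmem, hmin⟩ := ih (sstep sm x)
    constructor
    · rcases List.mem_cons.mp hmem with h | h
      · rcases hs with h2 | h2 <;> rw [h, h2] <;> simp
      · simp [h]
    · intro y hy
      have hms := hmin (sstep sm x) List.mem_cons_self
      have hle1 := hle.1
      have hle2 := hle.2
      rcases List.mem_cons.mp hy with rfl | hy
      · unfold lexBy at *; omega
      · rcases List.mem_cons.mp hy with rfl | hy
        · unfold lexBy at *; omega
        · exact hmin y (List.mem_cons_of_mem _ hy)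

-- both ways lexBy gives equal projections
lemma lex_antisymm (f g : List Int → Int) (j k : List Int)
    (h1 : lexBy f g j k) (h2 : lexBy f g k j) : f j = f k ∧ g j = g k := by
  unfold lexBy at h1 h2; omega

-- ===== VERDICT (by name: the statement is the Claim_ definition above) =====
theorem least_job_spec : Claim_equal_least_job := by
  intro curr jbs _ hpre
  obtain ⟨hne, hlen⟩ := hpre
  unfold Spec_least_job least_job least_job_alt
  simp only
  obtain ⟨sm0, hsm0⟩ : ∃ sm0, PySem.List.pyGet? jbs (-1) = some sm0 := by
    cases h : PySem.List.pyGet? jbs (-1) with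
    | some m => exact ⟨m, rfl⟩
    | none =>
      exfalso
      rcases (List.exists_cons_of_ne_nil hne) with ⟨a, t, rfl⟩
      simp [PySem.List.pyGet?, PySem.List.pyIdx?] at h
  have hsm0mem : sm0 ∈ jbs := by
    have h2 : jbs.getLast? = some sm0 := by
      rw [← hsm0]
      rcases (List.exists_cons_of_ne_nil hne) with ⟨a, t, rfl⟩
      simp [PySem.List.pyGet?, PySem.List.pyIdx?, List.getLast?_eq_getElem?]
    exact List.mem_of_getLast? h2
  rw [hsm0]
  dsimp only
  have hmap : jbs.map (fun j => [(PySem.List.pyGet? j 0).getD 0, (PySem.List.pyGet? j 1).getD 0]) = jbs := by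
    have : ∀ (l : List (List Int)), (∀ j ∈ l, j.length = 2) →
        l.map (fun j => [(PySem.List.pyGet? j 0).getD 0, (PySem.List.pyGet? j 1).getD 0]) = l := by
      intro l
      induction l with
      | nil => intro _; rfl
      | cons a t ih =>
        intro h
        have ha : a.length = 2 := h a List.mem_cons_self
        have hv : [(PySem.List.pyGet? a 0).getD 0, (PySem.List.pyGet? a 1).getD 0] = a := by
          match a, ha with
          | [x, y], _ => simp [PySem.List.pyGet?, PySem.List.pyIdx?]
        simp only [List.map_cons, hv, List.cons_inj_right]
        exact ih (fun j hj => h j (List.mem_cons_of_mem _ hj))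
    exact this jbs hlen
  rw [hmap]
  have e0 : (fun j : List Int => (PySem.List.pyGet? j 0).getD 0) = jf0 := rfl
  have e1 : (fun j : List Int => (PySem.List.pyGet? j 1).getD 0) = jf1 := rfl
  have e2 : (fun j : List Int => decide (curr ≥ (PySem.List.pyGet? j 0).getD 0))
      = (fun j => decide (curr ≥ jf0 j)) := rfl
  rw [e0, e1, e2, foldl_AStep]
  have hlexCS := sorted_sorted_lex jf1 jf0 jbs
  have hlexSC := sorted_sorted_lex jf0 jf1 jbs
  have hmemCS : ∀ y, y ∈ PySem.List.sorted (PySem.List.sorted jbs jf0) jf1 ↔ y ∈ jbs := by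
    intro y; rw [PySem.List.mem_sorted, PySem.List.mem_sorted]
  have hmemSC : ∀ y, y ∈ PySem.List.sorted (PySem.List.sorted jbs jf1) jf0 ↔ y ∈ jbs := by
    intro y; rw [PySem.List.mem_sorted, PySem.List.mem_sorted]
  cases hf : (PySem.List.sorted (PySem.List.sorted jbs jf0) jf1).find?
      (fun j => decide (curr ≥ jf0 j)) with
  | some mB =>
    dsimp only
    -- mB is available and in jbs
    have hmBp := List.find?_some hf
    have hmBmem : mB ∈ jbs := (hmemCS mB).mp (List.mem_of_find?_eq_some hf)
    -- the filter is nonempty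
    cases hflt : jbs.filter (fun j => decide (curr ≥ jf0 j)) with
    | nil =>
      exfalso
      have := List.filter_eq_nil_iff.mp hflt mB hmBmem
      exact this hmBp
    | cons a t =>
      obtain ⟨mA, hA1, hA2, hA3⟩ := foldl_mstepCS_min t a
      have hfold : (a :: t).foldl mstepCS none = some mA := by
        rw [List.foldl_cons]
        show t.foldl mstepCS (some a) = some mA
        exact hA1
      rw [hfold]
      dsimp only
      -- mA is in jbs and available
      have hAin : mA ∈ jbs.filter (fun j => decide (curr ≥ jf0 j)) := by rw [hflt]; exact hA2
      have hAmem : mA ∈ jbs := (List.mem_filter.mp hAin).1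
      have hAav : decide (curr ≥ jf0 mA) = true := (List.mem_filter.mp hAin).2
      -- mA is minimal among available
      have hAmin : ∀ y ∈ jbs, decide (curr ≥ jf0 y) = true → lexBy jf1 jf0 mA y := by
        intro y hy hav
        have : y ∈ jbs.filter (fun j => decide (curr ≥ jf0 j)) := List.mem_filter.mpr ⟨hy, hav⟩
        rw [hflt] at this
        exact hA3 y this
      -- mB is minimal among available (find? on the lex-sorted list)
      have hBmin := find?_pairwise_min (lexBy jf1 jf0) (fun j => decide (curr ≥ jf0 j)) _ mB hlexCS hf
      have hAB : mA = mB ∨ lexBy jf1 jf0 mB mA :=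
        hBmin mA ((hmemCS mA).mpr hAmem) hAav
      rcases hAB with h | h
      · exact h
      · have h2 := hAmin mB hmBmem hmBp
        obtain ⟨hq1, hq0⟩ := lex_antisymm jf1 jf0 mA mB h2 h
        exact eq_of_fields mA mB (hlen _ hAmem) (hlen _ hmBmem) hq0 hq1
  | none =>
    dsimp only
    -- no job is available: the filter is empty
    have hnone : ∀ y ∈ jbs, ¬ (decide (curr ≥ jf0 y) = true) := by
      intro y hy
      exact List.find?_eq_none.mp hf y ((hmemCS y).mpr hy)
    have hflt : jbs.filter (fun j => decide (curr ≥ jf0 j)) = [] := by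
      rw [List.filter_eq_nil_iff]
      exact hnone
    rw [hflt]
    simp only [List.foldl_nil]
    -- byStart is nonempty; its head is the lexBy jf0 jf1 minimum
    cases hbs : PySem.List.sorted (PySem.List.sorted jbs jf1) jf0 with
    | nil =>
      exfalso
      have := (PySem.List.sorted_eq_nil_iff _ _ _).mp hbs
      have := (PySem.List.sorted_eq_nil_iff _ _ _).mp this
      exact hne this
    | cons b bt =>
      simp only [PySem.List.pyGet?, PySem.List.pyIdx?]
      norm_num
      -- b is minimal over jbs for lexBy jf0 jf1
      have hbmin : ∀ y ∈ jbs, lexBy jf0 jf1 b y := by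
        intro y hy
        have : y ∈ b :: bt := by rw [← hbs]; exact (hmemSC y).mpr hy
        rcases List.mem_cons.mp this with rfl | hyt
        · exact lex_refl _ _ _
        · rw [hbs] at hlexSC
          exact (List.pairwise_cons.mp hlexSC).1 y hyt
      have hbmem : b ∈ jbs := (hmemSC b).mp (by rw [hbs]; exact List.mem_cons_self)
      obtain ⟨hsmem, hsmin⟩ := foldl_sstep_min jbs sm0
      have hsjbs : jbs.foldl sstep sm0 ∈ jbs := by
        rcases List.mem_cons.mp hsmem with h | h
        · rw [h]; exact hsm0mem
        · exact h
      obtain ⟨hq0, hq1⟩ := lex_antisymm jf0 jf1 (jbs.foldl sstep sm0) b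
        (hsmin b (List.mem_cons_of_mem _ hbmem)) (hbmin _ hsjbs)
      exact eq_of_fields _ _ (hlen _ hsjbs) (hlen _ hbmem) hq0 hq1
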